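-- pv_equiv track=rewrite | github.com/robotlightsyou/codewars | sep2020.py | likes
-- ===== SOURCE A (Python) =====
-- def likes(names):
--     x = len(names)
--     if x  == 0:
--         return "no one likes this"
--     elif x == 1:
--         return f'{names[0]} likes this'
--     elif 2 <= x <= 3:
--         liked = ""
--         for i in names[:-2]:
--             liked += f'{i}, '
--         liked += f'{names[-2]} and {names[-1]} like this'
--         return liked
--     else:
--         return f'{names[0]}, {names[1]} and {len(names) - 2} others like this'
-- ===== SOURCE B (Python) =====
-- def likes(names):
--     n = len(names)
--     if n == 0:
--         return "no one likes this"
--     shown = names[:3] if n <= 3 else names[:2] + [f"{n - 2} others"]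
--     head, last = shown[:-1], shown[-1]
--     subject = " and ".join([", ".join(head), last]) if head else last
--     verb = "likes this" if n == 1 else "like this"
--     return f"{subject} {verb}"
-- ===== Notes on version B (the rewrite author's own statement) =====
-- stated objective: idiomatic
-- what changed: Replaced A's length if/elif chain with its comma-accumulating inner loop by normalize-then-join: build a truncated subject list (up to two names plus either the last name or 'N others'), then produce the result with str.join and one verb choice.
import Mathlib
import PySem

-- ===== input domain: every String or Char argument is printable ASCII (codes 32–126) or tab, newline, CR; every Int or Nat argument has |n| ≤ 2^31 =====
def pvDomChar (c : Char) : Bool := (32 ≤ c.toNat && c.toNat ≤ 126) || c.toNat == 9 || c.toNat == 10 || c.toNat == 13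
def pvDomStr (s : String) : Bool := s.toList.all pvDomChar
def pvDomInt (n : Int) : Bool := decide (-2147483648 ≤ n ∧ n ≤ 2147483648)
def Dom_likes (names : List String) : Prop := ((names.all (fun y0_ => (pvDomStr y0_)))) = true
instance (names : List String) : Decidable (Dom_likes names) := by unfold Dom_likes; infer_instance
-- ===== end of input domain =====

-- B replaces A's length case chain and inner loop by normalize-then-join (truncate the
-- subject list, join it); objective: idiomatic, same cost.

-- ===== PORT A =====
-- literal port of A's length if/elif chain; pyGet? in the 2<=x<=3 branch is always
-- in range there, so .getD "" never fires (Python cannot raise in that branch)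
def likes (names : List String) : String :=
  let x : Int := names.length
  if x = 0 then "no one likes this"
  else if x = 1 then ((PySem.List.pyGet? names 0).getD "") ++ " likes this"
  else if 2 ≤ x ∧ x ≤ 3 then
    let liked := (PySem.List.slice names none (some (-2))).foldl
      (fun acc i => acc ++ i ++ ", ") ""
    liked ++ ((PySem.List.pyGet? names (-2)).getD "") ++ " and "
      ++ ((PySem.List.pyGet? names (-1)).getD "") ++ " like this"
  else ((PySem.List.pyGet? names 0).getD "") ++ ", " ++ ((PySem.List.pyGet? names 1).getD "")
      ++ " and " ++ PySem.Int.toStr ((names.length : Int) - 2) ++ " others like this"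

-- ===== PORT B =====
-- port of B: build a 'shown' subject list (at most 3 entries, the last possibly
-- "N others"), then join it with ", " / " and " and append the verb; shown is
-- nonempty whenever this branch runs, so pyGet? shown (-1) never misses
def likes_alt (names : List String) : String :=
  let n : Int := names.length
  if n = 0 then "no one likes this"
  else
    let shown := if n ≤ 3 then PySem.List.slice names none (some 3)
      else PySem.List.slice names none (some 2)
        ++ [PySem.Int.toStr (n - 2) ++ " others"]
    let head := PySem.List.slice shown none (some (-1))
    let last := (PySem.List.pyGet? shown (-1)).getD ""
    let subject := if head ≠ [] then
        PySem.Str.join " and " [PySem.Str.join ", " head, last]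
      else last
    let verb := if n = 1 then "likes this" else "like this"
    subject ++ " " ++ verb

-- ===== PRECONDITION & SPEC =====
def Spec_likes (names : List String) (out : String) : Prop := out = likes_alt names
instance (names : List String) (out : String) : Decidable (Spec_likes names out) := by unfold Spec_likes; infer_instance

-- ===== CLAIM (what is proved, stated in full; the proofs are below) =====
def Claim_equal_likes : Prop := ∀ (names : List String), Dom_likes names → Spec_likes names (likes names)

-- ===== LEMMAS AND PROOFS =====
theorem join_pair (sep a b : String) :
    PySem.Str.join sep [a, b] = a ++ sep ++ b := by
  rw [← String.toList_inj]
  simp [PySem.Str.join, PySem.Chars.join_cons_cons, PySem.Chars.join_singleton]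

theorem join_single (sep a : String) : PySem.Str.join sep [a] = a := by
  rw [← String.toList_inj]
  simp [PySem.Str.join, PySem.Chars.join_singleton]

-- ===== VERDICT (by name: the statement is the Claim_ definition above) =====
theorem likes_spec : Claim_equal_likes := by
  intro names _
  unfold Spec_likes likes likes_alt
  match names with
  | [] => rfl
  | [a] =>
      simp [PySem.List.slice, PySem.List.clampIdx, PySem.List.pyGet?, PySem.List.pyIdx?]
      rw [← String.toList_inj]; simp
  | [a, b] =>
      simp [PySem.List.slice, PySem.List.clampIdx, PySem.List.pyGet?, PySem.List.pyIdx?,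
            join_pair, String.append_assoc]
      exact (join_single ", " a).symm
  | [a, b, c] =>
      simp [PySem.List.slice, PySem.List.clampIdx, PySem.List.pyGet?, PySem.List.pyIdx?,
            join_pair, String.append_assoc]
  | a :: b :: c :: d :: t =>
      have h0 : ((a :: b :: c :: d :: t).length : Int) ≠ 0 := by simp; omega
      have h1 : ((a :: b :: c :: d :: t).length : Int) ≠ 1 := by simp; omega
      have h3 : ¬ (2 ≤ ((a :: b :: c :: d :: t).length : Int) ∧
                   ((a :: b :: c :: d :: t).length : Int) ≤ 3) := by
        simp; intro _; omega
      have h3' : ¬ ((a :: b :: c :: d :: t).length : Int) ≤ 3 := by simp; omega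
      have h2 : PySem.List.slice (a :: b :: c :: d :: t) none (some 2) = [a, b] := by
        simp [pysem]
      simp only [if_neg h0, if_neg h1, if_neg h3, if_neg h3',
                 PySem.List.pyGet?_zero_cons, Option.getD_some, h2]
      have hb : PySem.List.pyGet? (a :: b :: c :: d :: t) 1 = some b := by
        have := PySem.List.pyGet?_cons_succ (x := a) (xs := b :: c :: d :: t) (n := 0)
        simpa using this
      rw [hb]
      simp [PySem.List.slice, PySem.List.clampIdx, PySem.List.pyGet?, PySem.List.pyIdx?,
            join_pair, String.append_assoc]
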